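-- pv_equiv track=rewrite | github.com/volcengine/verl | atropos/environments/intern_bootcamp/internbootcamp_lib/internbootcamp/bootcamp/cmessy/cmessy.py | count_regular_prefixes
-- ===== SOURCE A (Python) =====
-- def count_regular_prefixes(s):
--     count = 0
--     balance = 0
--     for i in range(len(s)):
--         char = s[i]
--         balance += 1 if char == '(' else -1
--         if balance < 0:
--             break
--         if balance == 0:
--             count += 1
--     return count
-- ===== SOURCE B (Python) =====
-- def count_regular_prefixes(s):
--     # Build the full prefix-balance table, truncate it at the first negative
--     # balance, then count the zeros in the surviving segment.
--     bals = []
--     b = 0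
--     for c in s:
--         b += 1 if c == '(' else -1
--         bals.append(b)
--     neg = [i for i, v in enumerate(bals) if v < 0]
--     cut = neg[0] if neg else len(bals)
--     return bals[:cut].count(0)
-- ===== Notes on version B (the rewrite author's own statement) =====
-- stated objective: alternative
-- what changed: Replaces the single stateful loop with inline break by a three-phase pipeline: build the full prefix-balance table, find the first negative entry to truncate the table, and count zeros in the truncated slice.
import Mathlib
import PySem

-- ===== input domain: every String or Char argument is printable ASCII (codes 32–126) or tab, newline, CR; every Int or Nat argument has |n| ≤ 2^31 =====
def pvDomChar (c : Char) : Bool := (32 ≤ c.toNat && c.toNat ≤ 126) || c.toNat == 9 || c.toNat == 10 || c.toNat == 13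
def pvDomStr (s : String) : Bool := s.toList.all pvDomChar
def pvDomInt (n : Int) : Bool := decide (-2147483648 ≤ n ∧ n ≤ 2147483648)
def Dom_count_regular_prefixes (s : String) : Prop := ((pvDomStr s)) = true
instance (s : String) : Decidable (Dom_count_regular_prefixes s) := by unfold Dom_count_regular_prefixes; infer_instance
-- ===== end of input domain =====

-- B replaces A's single stateful loop (with inline break) by a pipeline:
-- build the full prefix-balance table, truncate at the first negative, count zeros.

-- ===== PORT A =====
-- A's loop over s with state (count, balance) and early break on balance < 0.
def pvGoA : List Char → Int → Int → Int
  | [], count, _ => count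
  | c :: rest, count, balance =>
    let balance' := balance + (if c = '(' then 1 else -1)
    if balance' < 0 then count
    else if balance' = 0 then pvGoA rest (count + 1) balance'
    else pvGoA rest count balance'

def count_regular_prefixes (s : String) : Int := pvGoA s.toList 0 0

-- ===== PORT B =====
-- bals: the running-balance table built by B's first loop.
def pvBalances : List Char → Int → List Int
  | [], _ => []
  | c :: rest, b =>
    let b' := b + (if c = '(' then 1 else -1)
    b' :: pvBalances rest b'

def count_regular_prefixes_alt (s : String) : Int :=
  let bals := pvBalances s.toList 0
  let neg := (PySem.List.enumerate bals).filter (fun p => decide (p.2 < 0))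
  let cut : Int := match neg with | [] => (bals.length : Int) | p :: _ => p.1
  PySem.List.count (PySem.List.slice bals (some 0) (some cut)) 0

-- ===== PRECONDITION & SPEC =====
def Spec_count_regular_prefixes (s : String) (out : Int) : Prop := out = count_regular_prefixes_alt s
instance (s : String) (out : Int) : Decidable (Spec_count_regular_prefixes s out) := by unfold Spec_count_regular_prefixes; infer_instance

-- ===== CLAIM (what is proved, stated in full; the proofs are below) =====
def Claim_equal_count_regular_prefixes : Prop := ∀ (s : String), Dom_count_regular_prefixes s → Spec_count_regular_prefixes s (count_regular_prefixes s)

-- ===== LEMMAS AND PROOFS =====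

-- head index of the filtered enumeration = first index of a negative balance
theorem pv_head_filter (l : List Int) (s : Int) :
    (((PySem.List.enumerate l s).filter (fun p => decide (p.2 < 0))).head?.map Prod.fst)
      = (l.findIdx? (fun b => decide (b < 0))).map (fun k => s + (k : Int)) := by
  induction l generalizing s with
  | nil => simp [PySem.List.enumerate_nil]
  | cons b rest ih =>
    by_cases hb : b < 0
    · simp [PySem.List.enumerate_cons, List.findIdx?_cons, hb]
    · simp only [PySem.List.enumerate_cons, List.filter_cons, List.findIdx?_cons,
        show decide ((s, b).2 < 0) = false from by simp [hb], Bool.false_eq_true, if_false]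
      rw [ih (s + 1)]
      cases rest.findIdx? (fun b => decide (b < 0)) with
      | none => simp
      | some k => simp; ring

-- take up to the first negative = takeWhile nonnegative
theorem pv_take_findIdx (l : List Int) (k : Nat)
    (h : l.findIdx? (fun b => decide (b < 0)) = some k) :
    l.take k = l.takeWhile (fun b => decide (0 ≤ b)) := by
  induction l generalizing k with
  | nil => simp at h
  | cons b rest ih =>
    by_cases hb : b < 0
    · simp [List.findIdx?_cons, hb] at h
      subst h
      simp [show ¬ (0 ≤ b) by omega]
    · simp [List.findIdx?_cons, hb] at h
      obtain ⟨k', hk', rfl⟩ := h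
      simp [show (0 : Int) ≤ b by omega, ih k' hk']

-- no negative entry: takeWhile nonnegative keeps everything
theorem pv_takeWhile_all (l : List Int)
    (h : ∀ b ∈ l, (0 : Int) ≤ b) :
    l.takeWhile (fun b => decide (0 ≤ b)) = l := by
  induction l with
  | nil => rfl
  | cons b rest ih =>
    have hb := h b (List.mem_cons_self ..)
    simp [hb, ih (fun x hx => h x (List.mem_cons_of_mem _ hx))]

-- A's loop counts the zeros among the balances kept before the first negative
theorem pv_goA_eq (cs : List Char) (bal count : Int) :
    pvGoA cs count bal
      = count + (((pvBalances cs bal).takeWhile (fun b => decide (0 ≤ b))).count 0 : Int) := by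
  induction cs generalizing bal count with
  | nil => simp [pvGoA, pvBalances]
  | cons c rest ih =>
    simp only [pvGoA, pvBalances]
    set b' := bal + (if c = '(' then 1 else -1) with hb'
    by_cases h1 : b' < 0
    · simp [h1, show ¬ (0 ≤ b') by omega]
    · have h0 : (0 : Int) ≤ b' := by omega
      by_cases h2 : b' = 0
      · simp only [h2, if_true]
        rw [ih]
        simp
        ring
      · simp only [h1, if_false, h2, if_false]
        rw [ih]
        simp [h0, h2]

-- ===== VERDICT (by name: the statement is the Claim_ definition above) =====
theorem count_regular_prefixes_spec : Claim_equal_count_regular_prefixes := by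
  intro s _
  unfold Spec_count_regular_prefixes count_regular_prefixes count_regular_prefixes_alt
  simp only []
  rw [pv_goA_eq]
  have hhead := pv_head_filter (pvBalances s.toList 0) 0
  cases hfi : (pvBalances s.toList 0).findIdx? (fun b => decide (b < 0)) with
  | none =>
    rw [hfi] at hhead
    have hnil : List.filter (fun p => decide (p.2 < 0)) (PySem.List.enumerate (pvBalances s.toList 0)) = [] := by
      cases hc : List.filter (fun p => decide (p.2 < 0)) (PySem.List.enumerate (pvBalances s.toList 0)) with
      | nil => rfl
      | cons q t => rw [hc] at hhead; simp at hhead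
    have hall : ∀ b ∈ pvBalances s.toList 0, (0 : Int) ≤ b := by
      rw [List.findIdx?_eq_none_iff] at hfi
      intro b hb
      have := hfi b hb
      simp at this
      omega
    simp [hnil, PySem.List.slice_zero_start, PySem.List.slice_to_natCast, PySem.List.count_eq,
      pv_takeWhile_all _ hall, List.take_length]
  | some k =>
    rw [hfi] at hhead
    cases hne : ((PySem.List.enumerate (pvBalances s.toList 0)).filter (fun p => decide (p.2 < 0))) with
    | nil => rw [hne] at hhead; simp at hhead
    | cons p tl =>
      rw [hne] at hhead
      simp only [List.head?_cons, Option.map_some] at hhead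
      have hp1 : p.1 = (k : Int) := by
        simp at hhead
        omega
      simp [hp1, PySem.List.slice_zero_start, PySem.List.slice_to_natCast, PySem.List.count_eq,
        pv_take_findIdx _ k hfi]
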